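-- pv_equiv track=rewrite | github.com/jwhhh/leetcode-practice | src/unclassified/p1366.py | rankTeams
-- ===== SOURCE A (Python) =====
-- from typing import List
--
-- def rankTeams(votes: List[str]) -> str:
--     if len(votes) == 0:
--         return ""
--
--     teams_num = len(votes[0])
--     if teams_num == 0:
--         return ""
--
--     # collect statistics
--     vote_count_dict = {}
--     for vote in votes:
--         for pos in range(len(vote)):
--             val = vote[pos]
--             if val not in vote_count_dict:
--                 vote_count_dict[val] = [0] * teams_num
--             vote_count_dict[val][pos] += 1
--
--     # rank from statistics
--     vote_count_dict = sorted(vote_count_dict.items())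
--     sorted_vote_count = sorted(vote_count_dict, key=lambda e: e[1], reverse=True)
--     res_list = [e[0] for e in sorted_vote_count]
--
--     return "".join(res_list)
-- ===== SOURCE B (Python) =====
-- from typing import List
--
-- def rankTeams(votes: List[str]) -> str:
--     if not votes or not votes[0]:
--         return ""
--
--     n = len(votes[0])
--     counts = {}
--     for vote in votes:
--         for pos, ch in enumerate(vote):
--             if ch not in counts:
--                 counts[ch] = [0] * n
--             counts[ch][pos] += 1
--
--     # no sort at all: selection loop — repeatedly scan the remaining teams for the
--     # best one (greater count vector, or equal vector and smaller letter), emit it,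
--     # and remove it from the pool
--     items = list(counts.items())
--     out = []
--     while items:
--         best = items[0]
--         for it in items[1:]:
--             if it[1] > best[1] or (it[1] == best[1] and it[0] < best[0]):
--                 best = it
--         out.append(best[0])
--         items.remove(best)
--     return "".join(out)
-- ===== Notes on version B (the rewrite author's own statement) =====
-- stated objective: alternative
-- what changed: A ranks by two library sorts (alphabetical, then stable reverse sort on the count vectors); B uses no sort at all: a selection loop that repeatedly scans the remaining teams for the best one (greater count vector, ties by smaller letter), emits it and removes it from the pool.
import Mathlib
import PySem

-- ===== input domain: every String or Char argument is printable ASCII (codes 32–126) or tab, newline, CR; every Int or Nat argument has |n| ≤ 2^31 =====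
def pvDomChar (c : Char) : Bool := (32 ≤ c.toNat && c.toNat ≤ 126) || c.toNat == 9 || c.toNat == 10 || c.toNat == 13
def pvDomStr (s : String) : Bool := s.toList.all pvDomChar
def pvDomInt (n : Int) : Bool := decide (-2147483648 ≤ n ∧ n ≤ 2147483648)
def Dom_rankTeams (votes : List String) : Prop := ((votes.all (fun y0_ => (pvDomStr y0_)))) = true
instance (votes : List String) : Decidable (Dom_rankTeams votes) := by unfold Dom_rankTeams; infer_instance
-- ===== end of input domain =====

-- B replaces A's two library sorts (alphabetical, then stable reverse sort by count vector)
-- by a sort-free selection loop: repeatedly scan the remaining teams for the best one,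
-- emit it and remove it — objective: alternative (same result, no sort).

-- ===== PORT A =====
-- the counting loop: for vote in votes: for pos in range(len(vote)): val = vote[pos]; …
-- (iteration over pos/val pairs ported via enumerate — identical pairs since pos runs over range(len(vote)));
-- 'vote_count_dict[val][pos] += 1' is ported with List.set, exact when pos < teams_num (Pre_ excludes the
-- IndexError inputs where some vote is longer than votes[0]).
def pvCountA (n : Nat) (votes : List String) : PySem.Dict Char (List Int) :=
  votes.foldl (fun d vote =>
    (PySem.List.enumerate vote.toList).foldl (fun d pv =>
      let d1 := if d.contains pv.2 then d else d.insert pv.2 (List.replicate n (0 : Int))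
      d1.modify pv.2 [] (fun l => l.set pv.1.toNat (l.getD pv.1.toNat 0 + 1))) d)
    PySem.Dict.empty

def rankTeams (votes : List String) : String :=
  match votes with
  | [] => ""                          -- if len(votes) == 0: return ""
  | v0 :: _ =>
    let teams_num := v0.length
    if teams_num = 0 then "" else     -- if teams_num == 0: return ""
    let d := pvCountA teams_num votes
    -- sorted(vote_count_dict.items()): Python tuple comparison = lexicographic on (key, value)
    let vote_count_list := PySem.List.sorted2 d.items (fun e => e.1) (fun e => e.2) false
    let sorted_vote_count := PySem.List.sorted vote_count_list (fun e => e.2) true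
    let res_list := sorted_vote_count.map (fun e => e.1)
    String.ofList res_list                -- "".join(res_list)

-- ===== PORT B =====
-- same counting loop as A (Source B counts identically)
def pvCountB (n : Nat) (votes : List String) : PySem.Dict Char (List Int) :=
  votes.foldl (fun d vote =>
    (PySem.List.enumerate vote.toList).foldl (fun d pv =>
      let d1 := if d.contains pv.2 then d else d.insert pv.2 (List.replicate n (0 : Int))
      d1.modify pv.2 [] (fun l => l.set pv.1.toNat (l.getD pv.1.toNat 0 + 1))) d)
    PySem.Dict.empty

-- it[1] > best[1] or (it[1] == best[1] and it[0] < best[0])   (Python list/char comparison = Lean '<')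
def pvBetter (it best : Char × List Int) : Bool :=
  decide (best.2 < it.2) || (decide (it.2 = best.2) && decide (it.1 < best.1))

-- the inner scan: for it in items[1:]: if …: best = it
def pvBest (best : Char × List Int) : List (Char × List Int) → Char × List Int
  | [] => best
  | it :: rest => pvBest (if pvBetter it best then it else best) rest

-- items.remove(best): drop the first occurrence ([] branch unreachable in the port: best ∈ items)
def pvRemove (x : Char × List Int) : List (Char × List Int) → List (Char × List Int)
  | [] => []
  | a :: as => if a = x then as else a :: pvRemove x as

-- termination facts the port cites by name
lemma pvBest_mem (b : Char × List Int) (l : List (Char × List Int)) : pvBest b l ∈ b :: l := by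
  induction l generalizing b with
  | nil => simp [pvBest]
  | cons it rest ih =>
    simp only [pvBest]
    rcases List.mem_cons.mp (ih (if pvBetter it b then it else b)) with h | h
    · rw [h]; split <;> simp
    · simp [h]

lemma pvRemove_length_lt (x : Char × List Int) (l : List (Char × List Int)) (h : x ∈ l) :
    (pvRemove x l).length < l.length := by
  induction l with
  | nil => simp at h
  | cons a as ih =>
    by_cases ha : a = x
    · simp [pvRemove, ha]
    · rcases List.mem_cons.mp h with rfl | h
      · exact absurd rfl ha
      · simpa [pvRemove, ha] using ih h

-- the while loop: pick best, append its char, remove it from the pool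
def pvSelect (items : List (Char × List Int)) : List Char :=
  match items with
  | [] => []
  | it0 :: rest =>
    (pvBest it0 rest).1 :: pvSelect (pvRemove (pvBest it0 rest) (it0 :: rest))
termination_by items.length
decreasing_by exact pvRemove_length_lt _ _ (pvBest_mem it0 rest)

def rankTeams_alt (votes : List String) : String :=
  match votes with
  | [] => ""                          -- if not votes: return ""
  | v0 :: _ =>
    if v0.length = 0 then "" else     -- if not votes[0]: return ""
    let counts := pvCountB v0.length votes
    String.ofList (pvSelect counts.items)   -- "".join(out)

-- ===== PRECONDITION & SPEC =====
-- Pre_ excludes exactly the inputs on which A raises IndexError: a vote longer than votes[0]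
-- while votes[0] is nonempty (B's identical counting loop raises there too).
def Pre_rankTeams (votes : List String) : Prop :=
  (votes.headD "").length = 0 ∨ ∀ v ∈ votes, v.length ≤ (votes.headD "").length
instance (votes : List String) : Decidable (Pre_rankTeams votes) := by
  unfold Pre_rankTeams; infer_instance

def pvWitness_rankTeams : List String := ["abc", "acb", "abc"]

def Spec_rankTeams (votes : List String) (out : String) : Prop := out = rankTeams_alt votes
instance (votes : List String) (out : String) : Decidable (Spec_rankTeams votes out) := by
  unfold Spec_rankTeams; infer_instance

-- ===== CLAIM (what is proved, stated in full; the proofs are below) =====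
def Claim_equal_rankTeams : Prop :=
  ∀ (votes : List String), Dom_rankTeams votes → Pre_rankTeams votes →
    Spec_rankTeams votes (rankTeams votes)

-- ===== LEMMAS AND PROOFS =====

-- the strict total order that characterises the final ranking:
-- count vector descending, team char ascending on ties
def pvS (a b : Char × List Int) : Prop := b.2 < a.2 ∨ (b.2 = a.2 ∧ a.1 < b.1)

lemma pvS_trans (a b c : Char × List Int) (h1 : pvS a b) (h2 : pvS b c) : pvS a c := by
  rcases h1 with h1 | ⟨e1, c1⟩ <;> rcases h2 with h2 | ⟨e2, c2⟩
  · exact Or.inl (lt_trans h2 h1)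
  · exact Or.inl (e2 ▸ h1)
  · exact Or.inl (e1 ▸ h2)
  · exact Or.inr ⟨e1 ▸ e2, lt_trans c1 c2⟩

lemma pvS_asymm (a b : Char × List Int) (h1 : pvS a b) (h2 : pvS b a) : False := by
  rcases h1 with h1 | ⟨e1, c1⟩ <;> rcases h2 with h2 | ⟨e2, c2⟩
  · exact absurd (lt_trans h1 h2) (lt_irrefl _)
  · exact absurd h1 (e2 ▸ lt_irrefl _)
  · exact absurd h2 (e1 ▸ lt_irrefl _)
  · exact absurd (lt_trans c1 c2) (lt_irrefl _)

-- pvS is total on pairs with distinct chars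
lemma pvS_total (x y : Char × List Int) (hne : x.1 ≠ y.1) : pvS x y ∨ pvS y x := by
  rcases lt_trichotomy y.2 x.2 with h | h | h
  · exact Or.inl (Or.inl h)
  · rcases lt_trichotomy x.1 y.1 with h' | h' | h'
    · exact Or.inl (Or.inr ⟨h, h'⟩)
    · exact absurd h' hne
    · exact Or.inr (Or.inr ⟨h.symm, h'⟩)
  · exact Or.inr (Or.inl h)

lemma pvBetter_iff (it best : Char × List Int) : pvBetter it best = true ↔ pvS it best := by
  unfold pvBetter pvS
  simp only [Bool.or_eq_true, Bool.and_eq_true, decide_eq_true_eq]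
  exact or_congr Iff.rfl (and_congr eq_comm Iff.rfl)

-- ---------- B-side: the selection loop produces the pvS-sorted order ----------

lemma pvBest_min (T : List (Char × List Int))
    (htot : ∀ x ∈ T, ∀ y ∈ T, x = y ∨ pvS x y ∨ pvS y x) :
    ∀ (l : List (Char × List Int)) (b : Char × List Int), b ∈ T → (∀ y ∈ l, y ∈ T) →
      ∀ y ∈ b :: l, y = pvBest b l ∨ pvS (pvBest b l) y := by
  intro l
  induction l with
  | nil =>
    intro b _ _ y hy
    simp only [List.mem_singleton] at hy
    exact Or.inl (hy.trans rfl)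
  | cons it rest ih =>
    intro b hb hl y hy
    have hit : it ∈ T := hl it (by simp)
    have hc : (if pvBetter it b then it else b) ∈ T := by split <;> assumption
    have hrest : ∀ z ∈ rest, z ∈ T := fun z hz => hl z (by simp [hz])
    have IH := ih (if pvBetter it b then it else b) hc hrest
    have hcb : (if pvBetter it b then it else b) = b ∨
        pvS (if pvBetter it b then it else b) b := by
      by_cases h : pvBetter it b = true
      · exact Or.inr (by simpa [h] using (pvBetter_iff it b).mp h)
      · simp [h]
    have hcit : (if pvBetter it b then it else b) = it ∨
        pvS (if pvBetter it b then it else b) it := by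
      by_cases h : pvBetter it b = true
      · simp [h]
      · have hnp : ¬ pvS it b := fun hp => h ((pvBetter_iff it b).mpr hp)
        rcases htot b hb it hit with he | hp | hp
        · exact Or.inl (by simp [he])
        · exact Or.inr (by simpa [h] using hp)
        · exact absurd hp hnp
    have key : ∀ z, (z = (if pvBetter it b then it else b) ∨
        pvS (if pvBetter it b then it else b) z) →
        z = pvBest b (it :: rest) ∨ pvS (pvBest b (it :: rest)) z := by
      intro z hz
      have hIHc := IH _ (List.mem_cons_self)
      simp only [pvBest]
      rcases hz with rfl | hz
      · exact hIHc
      · rcases hIHc with he | hp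
        · exact Or.inr (he ▸ hz)
        · exact Or.inr (pvS_trans _ _ _ hp hz)
    rcases List.mem_cons.mp hy with rfl | hy
    · refine key y ?_
      rcases hcb with he | hp
      · exact Or.inl he.symm
      · exact Or.inr hp
    · rcases List.mem_cons.mp hy with rfl | hy
      · refine key y ?_
        rcases hcit with he | hp
        · exact Or.inl he.symm
        · exact Or.inr hp
      · simpa only [pvBest] using IH y (by simp [hy])

lemma pvRemove_perm (x : Char × List Int) (l : List (Char × List Int)) (h : x ∈ l) :
    l.Perm (x :: pvRemove x l) := by
  induction l with
  | nil => simp at h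
  | cons a as ih =>
    by_cases ha : a = x
    · simp [pvRemove, ha]
    · have hx : x ∈ as := by
        rcases List.mem_cons.mp h with rfl | h
        · exact absurd rfl ha
        · exact h
      have h2 : (a :: as).Perm (a :: x :: pvRemove x as) := (ih hx).cons a
      have h3 : (a :: x :: pvRemove x as).Perm (x :: a :: pvRemove x as) :=
        List.Perm.swap _ _ _
      have h4 : pvRemove x (a :: as) = a :: pvRemove x as := by simp [pvRemove, ha]
      rw [h4]
      exact h2.trans h3

lemma pvRemove_sublist (x : Char × List Int) (l : List (Char × List Int)) :
    (pvRemove x l).Sublist l := by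
  induction l with
  | nil => simp [pvRemove]
  | cons a as ih =>
    by_cases ha : a = x
    · subst ha
      simp only [pvRemove, if_pos rfl]
      exact List.sublist_cons_self _ _
    · simpa [pvRemove, ha] using ih.cons₂ a

-- the selection loop equals (the chars of) ANY pvS-sorted permutation of the items
lemma pvSelect_eq (n : Nat) :
    ∀ (items Z : List (Char × List Int)), items.length ≤ n →
      (∀ x ∈ items, ∀ y ∈ items, x = y ∨ pvS x y ∨ pvS y x) →
      Z.Perm items → Z.Pairwise pvS → pvSelect items = Z.map Prod.fst := by
  induction n with
  | zero =>
    intro items Z hlen _ hperm _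
    have : items = [] := List.length_eq_zero_iff.mp (Nat.le_zero.mp hlen)
    subst this
    simp [pvSelect, List.perm_nil.mp hperm]
  | succ n ih =>
    intro items Z hlen htot hperm hZ
    match items, Z with
    | [], Z => simp [pvSelect, List.perm_nil.mp hperm]
    | it0 :: rest, [] => exact absurd (List.perm_nil.mp hperm.symm) (by simp)
    | it0 :: rest, z :: Z' =>
      have hbm : pvBest it0 rest ∈ it0 :: rest := pvBest_mem it0 rest
      have hmin := pvBest_min (it0 :: rest) htot rest it0 (by simp) (fun y hy => by simp [hy])
      have hz : z ∈ it0 :: rest := hperm.mem_iff.mp (by simp)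
      have hzb : z = pvBest it0 rest := by
        rcases hmin z hz with h | h
        · exact h
        · -- pvS best z: best is in z :: Z'; if best ≠ z it is in Z', contradiction via asymm
          rcases List.mem_cons.mp (hperm.mem_iff.mpr hbm) with he | hm
          · exact he.symm
          · exact absurd (pvS_asymm _ _ ((List.pairwise_cons.mp hZ).1 _ hm) h) id
      rw [pvSelect]
      have hperm' : Z'.Perm (pvRemove (pvBest it0 rest) (it0 :: rest)) := by
        have h1 : (z :: Z').Perm (pvBest it0 rest :: pvRemove (pvBest it0 rest) (it0 :: rest)) :=
          hperm.trans (pvRemove_perm _ _ hbm)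
        rw [hzb] at h1
        exact h1.cons_inv
      have hsub := pvRemove_sublist (pvBest it0 rest) (it0 :: rest)
      have htail := ih (pvRemove (pvBest it0 rest) (it0 :: rest)) Z'
        (by
          have h := pvRemove_length_lt _ _ hbm
          simp only [List.length_cons] at h hlen
          omega)
        (fun x hx y hy => htot x (hsub.subset hx) y (hsub.subset hy))
        hperm' (List.pairwise_cons.mp hZ).2
      simp [htail, hzb]

-- ---------- A-side: the two-stage sort is pairwise pvS ----------

-- insertBy preserves pairwise S when S can justify every placement
lemma pv_insertBy_pairwise {α : Type} (before : α → α → Bool) (S : α → α → Prop)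
    (P : α → Prop) (x : α) (acc : List α) (hPx : P x) (hPacc : ∀ y ∈ acc, P y)
    (hacc : acc.Pairwise S)
    (hkeep : ∀ y ∈ acc, before x y = false → S y x)
    (hins : ∀ y, P y → before x y = true → S x y)
    (htrans : ∀ a b c, P a → P b → P c → S a b → S b c → S a c) :
    (PySem.List.insertBy before x acc).Pairwise S := by
  induction acc with
  | nil => simp [PySem.List.insertBy]
  | cons y ys ih =>
    by_cases hb : before x y = true
    · simp only [PySem.List.insertBy, hb, if_true]
      refine List.Pairwise.cons ?_ hacc
      intro z hz
      rcases List.mem_cons.mp hz with rfl | hz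
      · exact hins z (hPacc z (by simp)) hb
      · exact htrans x y z hPx (hPacc y (by simp)) (hPacc z (by simp [hz]))
          (hins y (hPacc y (by simp)) hb) ((List.pairwise_cons.mp hacc).1 z hz)
    · simp only [PySem.List.insertBy, hb]
      refine List.Pairwise.cons ?_ ?_
      · intro z hz
        rcases (PySem.List.mem_insertBy before x z ys).mp hz with rfl | hz
        · exact hkeep y (by simp) (by simpa using hb)
        · exact (List.pairwise_cons.mp hacc).1 z hz
      · exact ih (fun z hz => hPacc z (by simp [hz])) (List.pairwise_cons.mp hacc).2
          (fun z hz hf => hkeep z (by simp [hz]) hf)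

-- the insertion-sort fold yields a list pairwise in S
lemma pv_foldl_insertBy_pairwise {α : Type} (before : α → α → Bool) (S : α → α → Prop)
    (P : α → Prop) (Pre : α → α → Prop) (xs : List α) (acc : List α)
    (hPxs : ∀ x ∈ xs, P x) (hPacc : ∀ y ∈ acc, P y)
    (hacc : acc.Pairwise S)
    (hax : ∀ y ∈ acc, ∀ x ∈ xs, Pre y x)
    (hxs : xs.Pairwise Pre)
    (C1 : ∀ y x, P y → P x → Pre y x → before x y = false → S y x)
    (C2 : ∀ x y, P x → P y → before x y = true → S x y)
    (htrans : ∀ a b c, P a → P b → P c → S a b → S b c → S a c) :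
    (xs.foldl (fun acc x => PySem.List.insertBy before x acc) acc).Pairwise S := by
  induction xs generalizing acc with
  | nil => exact hacc
  | cons x xs ih =>
    simp only [List.foldl_cons]
    have hPx : P x := hPxs x (by simp)
    apply ih
    · exact fun z hz => hPxs z (by simp [hz])
    · intro y hy
      rcases (PySem.List.mem_insertBy before x y acc).mp hy with rfl | hy
      · exact hPx
      · exact hPacc y hy
    · exact pv_insertBy_pairwise before S P x acc hPx hPacc hacc
        (fun y hy hf => C1 y x (hPacc y hy) hPx (hax y hy x (by simp)) hf)
        (fun y hPy hb => C2 x y hPx hPy hb) htrans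
    · intro y hy x' hx'
      rcases (PySem.List.mem_insertBy before x y acc).mp hy with rfl | hy
      · exact (List.pairwise_cons.mp hxs).1 x' hx'
      · exact hax y hy x' (by simp [hx'])
    · exact (List.pairwise_cons.mp hxs).2

-- keys of the counting dict stay unique
lemma pv_count_nodup (n : Nat) (votes : List String) : (pvCountA n votes).keys.Nodup := by
  unfold pvCountA
  have hstep : ∀ (d : PySem.Dict Char (List Int)) (vote : String), d.keys.Nodup →
      ((PySem.List.enumerate vote.toList).foldl (fun d pv =>
        let d1 := if d.contains pv.2 then d else d.insert pv.2 (List.replicate n (0 : Int))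
        d1.modify pv.2 [] (fun l => l.set pv.1.toNat (l.getD pv.1.toNat 0 + 1))) d).keys.Nodup := by
    intro d vote hd
    generalize (PySem.List.enumerate vote.toList) = l
    induction l generalizing d with
    | nil => exact hd
    | cons pv l ih =>
      apply ih
      have h1 : (if d.contains pv.2 then d
          else d.insert pv.2 (List.replicate n (0 : Int))).keys.Nodup := by
        split
        · exact hd
        · exact PySem.Dict.nodup_keys_insert d _ _ hd
      unfold PySem.Dict.modify
      exact PySem.Dict.nodup_keys_insert _ _ _ h1
  have hbase : (PySem.Dict.empty (κ := Char) (ν := List Int)).keys.Nodup := by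
    simp [PySem.Dict.empty, PySem.Dict.keys]
  generalize PySem.Dict.empty = d0 at hbase ⊢
  induction votes generalizing d0 with
  | nil => exact hbase
  | cons v vs ih => exact ih _ (hstep d0 v hbase)

-- the ports' sort calls, unfolded to their insertion-sort folds (definitional)
lemma pv_unfold_sortA1 (items : List (Char × List Int)) :
    PySem.List.sorted2 items (fun e => e.1) (fun e => e.2) false
    = items.foldl (fun acc x => PySem.List.insertBy
        (fun a b : Char × List Int =>
          decide (a.1 < b.1) || (!decide (b.1 < a.1) && decide (a.2 < b.2))) x acc) [] := rfl

lemma pv_unfold_sortA2 (ys : List (Char × List Int)) :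
    PySem.List.sorted ys (fun e => e.2) true
    = ys.foldl (fun acc x => PySem.List.insertBy
        (fun a b : Char × List Int => decide (b.2 < a.2)) x acc) [] := rfl

-- A's final sorted list is pairwise in pvS (stability of sort 2 gives the char tiebreak)
lemma pv_A_pairwise (items : List (Char × List Int))
    (hnd : items.Pairwise (fun a b => a.1 ≠ b.1)) :
    (PySem.List.sorted (PySem.List.sorted2 items (fun e => e.1) (fun e => e.2) false)
      (fun e => e.2) true).Pairwise pvS := by
  set ys := PySem.List.sorted2 items (fun e => e.1) (fun e => e.2) false with hysdef
  have hys : ys.Pairwise (fun a b : Char × List Int => a.1 < b.1) := by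
    rw [hysdef, pv_unfold_sortA1]
    refine pv_foldl_insertBy_pairwise _ _ (fun p => p ∈ items) (fun a b => a.1 ≠ b.1)
      items [] (fun x hx => hx) (by simp) (by simp) (by simp) hnd ?_ ?_
      (fun a b c _ _ _ => lt_trans)
    · intro y x _ _ hne hf
      simp only [Bool.or_eq_false_iff, Bool.and_eq_false_iff, decide_eq_false_iff_not,
        Bool.not_eq_false', decide_eq_true_eq] at hf
      rcases hf.2 with h | h
      · exact h
      · rcases lt_trichotomy y.1 x.1 with h' | h' | h'
        · exact h'
        · exact absurd h' hne
        · exact absurd h' hf.1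
    · intro x y hx hy hb
      simp only [Bool.or_eq_true, Bool.and_eq_true, decide_eq_true_eq,
        Bool.not_eq_true', decide_eq_false_iff_not] at hb
      rcases hb with h | ⟨h1, h2⟩
      · exact h
      · rcases lt_trichotomy x.1 y.1 with h' | h' | h'
        · exact h'
        · have hxy : x = y := by
            by_cases hxy : x = y
            · exact hxy
            · exact absurd h' ((List.Pairwise.forall (fun a b h => Ne.symm h) hnd) hx hy hxy)
          exact absurd (hxy ▸ h2) (lt_irrefl _)
        · exact absurd h' h1
  rw [pv_unfold_sortA2]
  refine pv_foldl_insertBy_pairwise _ pvS (fun _ => True)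
    (fun a b : Char × List Int => a.1 < b.1) ys [] (fun _ _ => trivial) (by simp)
    (by simp) (by simp) hys ?_ ?_ (fun a b c _ _ _ => pvS_trans a b c)
  · intro y x _ _ hlt hf
    simp only [decide_eq_false_iff_not] at hf
    rcases lt_or_eq_of_le (le_of_not_gt hf) with h | h
    · exact Or.inl h
    · exact Or.inr ⟨h, hlt⟩
  · intro x y _ _ hb
    simp only [decide_eq_true_eq] at hb
    exact Or.inl hb

-- ---------- the two ports agree ----------

lemma pv_ports_eq (votes : List String) : rankTeams votes = rankTeams_alt votes := by
  cases votes with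
  | nil => rfl
  | cons v0 rest =>
    unfold rankTeams rankTeams_alt
    by_cases h0 : v0.length = 0
    · simp [h0]
    · simp only [h0, if_false]
      have hBA : pvCountB v0.length (v0 :: rest) = pvCountA v0.length (v0 :: rest) := rfl
      rw [hBA]
      set items := (pvCountA v0.length (v0 :: rest)).items with hitems
      have hnd' : items.Pairwise (fun a b : Char × List Int => a.1 ≠ b.1) := by
        have : (items.map Prod.fst).Nodup := pv_count_nodup v0.length (v0 :: rest)
        exact (List.pairwise_map.mp this)
      have htot : ∀ x ∈ items, ∀ y ∈ items, x = y ∨ pvS x y ∨ pvS y x := by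
        intro x hx y hy
        by_cases hxy : x = y
        · exact Or.inl hxy
        · exact Or.inr (pvS_total x y
            ((List.Pairwise.forall (fun a b h => Ne.symm h) hnd') hx hy hxy))
      have hperm : (PySem.List.sorted (PySem.List.sorted2 items (fun e => e.1)
          (fun e => e.2) false) (fun e => e.2) true).Perm items :=
        (PySem.List.sorted_perm _ (fun e => e.2) true).trans
          (PySem.List.sorted2_perm items (fun e => e.1) (fun e => e.2) false)
      rw [pvSelect_eq items.length items _ (le_refl _) htot hperm (pv_A_pairwise items hnd')]

-- ===== VERDICT (by name: the statement is the Claim_ definition above) =====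
theorem rankTeams_spec : Claim_equal_rankTeams := by
  intro votes _ _
  unfold Spec_rankTeams
  exact pv_ports_eq votes
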